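-- pv_equiv track=rewrite | github.com/YassineOUAHMANE/Amazon_Preparation_Interview | hash_comparing_strings.py | group_identical_strings_simple
-- ===== SOURCE A (Python) =====
-- def group_identical_strings_simple(s: list) -> list:
--     n = len(s)
--     groups = []
--     visited = [False] * n
--
--     for i in range(n):
--         if visited[i]:
--             continue
--         current_group = [i]
--         for j in range(i + 1, n):
--             if s[i] == s[j]:
--                 visited[j] = True
--                 current_group.append(j)
--         groups.append(current_group)
--
--     return groups
-- ===== SOURCE B (Python) =====
-- def group_identical_strings_simple(s: list) -> list:
--     groups = {}
--     for i, x in enumerate(s):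
--         groups.setdefault(x, []).append(i)
--     return list(groups.values())
-- ===== Notes on version B (the rewrite author's own statement) =====
-- stated objective: faster
-- what changed: Replaces A's quadratic visited-array outer/inner index scan by a single pass that groups indices in a dict keyed by the string, returning the dict's values (insertion order = first-occurrence order).
import Mathlib
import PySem

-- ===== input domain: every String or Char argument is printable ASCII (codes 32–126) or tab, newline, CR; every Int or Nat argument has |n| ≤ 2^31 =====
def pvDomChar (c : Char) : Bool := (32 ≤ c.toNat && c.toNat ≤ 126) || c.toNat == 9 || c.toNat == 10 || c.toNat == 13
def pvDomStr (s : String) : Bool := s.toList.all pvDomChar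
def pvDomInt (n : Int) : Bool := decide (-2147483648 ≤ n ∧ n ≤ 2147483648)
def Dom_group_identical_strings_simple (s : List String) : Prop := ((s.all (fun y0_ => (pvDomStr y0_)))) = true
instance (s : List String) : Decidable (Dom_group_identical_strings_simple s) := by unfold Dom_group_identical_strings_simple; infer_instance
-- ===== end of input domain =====

-- B replaces A's quadratic visited-array scan by one dict pass (string -> index list), values in insertion order.

-- ===== PORT A =====
-- literal port: outer loop over range(n) with (groups, visited) state, inner loop over range(i+1, n)
-- with (current_group, visited) state; all indices are provably in range, so pyGetD/pySetD are exact.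
def group_identical_strings_simple (s : List String) : List (List Int) :=
  let n : Int := s.length
  ((PySem.List.pyRange 0 n).foldl (fun (st : List (List Int) × List Bool) i =>
    if PySem.List.pyGetD st.2 i false then st
    else
      let inner := (PySem.List.pyRange (i + 1) n).foldl
        (fun (st2 : List Int × List Bool) j =>
          if PySem.List.pyGetD s i "" == PySem.List.pyGetD s j "" then
            (st2.1 ++ [j], PySem.List.pySetD st2.2 j true)
          else st2) ([i], st.2)
      (st.1 ++ [inner.1], inner.2))
    ([], List.replicate s.length false)).1

-- ===== PORT B =====
-- literal port of Source B: groups.setdefault(x, []).append(i) appends i to the list stored at x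
-- (creating [] first), i.e. Dict.modify x [] (· ++ [i]); then list(groups.values()).
def group_identical_strings_simple_alt (s : List String) : List (List Int) :=
  let groups := (PySem.List.enumerate s).foldl
    (fun (d : PySem.Dict String (List Int)) p => d.modify p.2 [] (fun v => v ++ [p.1]))
    PySem.Dict.empty
  groups.values

-- ===== PRECONDITION & SPEC =====
def Spec_group_identical_strings_simple (s : List String) (out : List (List Int)) : Prop := out = group_identical_strings_simple_alt s
instance (s : List String) (out : List (List Int)) : Decidable (Spec_group_identical_strings_simple s out) := by unfold Spec_group_identical_strings_simple; infer_instance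

-- ===== CLAIM (what is proved, stated in full; the proofs are below) =====
def Claim_equal_group_identical_strings_simple : Prop := ∀ (s : List String), Dom_group_identical_strings_simple s → Spec_group_identical_strings_simple s (group_identical_strings_simple s)

-- ===== LEMMAS AND PROOFS =====

-- all occurrence indices of c in a list, counting from offset k
def pvOccs (c : String) : Int → List String → List Int
  | _, [] => []
  | k, y :: t => if y = c then k :: pvOccs c (k + 1) t else pvOccs c (k + 1) t

-- the strings of t not in seen, first occurrences, in order
def pvFirsts (seen : List String) : List String → List String
  | [] => []
  | y :: t => if y ∈ seen then pvFirsts seen t else y :: pvFirsts (y :: seen) t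

lemma pvOccs_append (c : String) (k : Int) (u v : List String) :
    pvOccs c k (u ++ v) = pvOccs c k u ++ pvOccs c (k + u.length) v := by
  induction u generalizing k with
  | nil => simp [pvOccs]
  | cons y t ih =>
    simp only [List.cons_append, pvOccs, ih, List.length_cons]
    have : k + 1 + (t.length : Int) = k + ((t.length : Int) + 1) := by ring
    split <;> simp [this]

lemma pvOccs_nil_of_not_mem (c : String) (k : Int) (u : List String) (h : c ∉ u) :
    pvOccs c k u = [] := by
  induction u generalizing k with
  | nil => rfl
  | cons y t ih =>
    simp only [List.mem_cons, not_or] at h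
    simp [pvOccs, Ne.symm h.1, ih _ h.2]

lemma pvFirsts_congr (seen₁ seen₂ t : List String) (h : ∀ y, y ∈ seen₁ ↔ y ∈ seen₂) :
    pvFirsts seen₁ t = pvFirsts seen₂ t := by
  induction t generalizing seen₁ seen₂ with
  | nil => rfl
  | cons y t ih =>
    simp only [pvFirsts]
    by_cases hy : y ∈ seen₁
    · rw [if_pos hy, if_pos ((h y).mp hy)]; exact ih _ _ h
    · rw [if_neg hy, if_neg (fun hc => hy ((h y).mpr hc))]
      congr 1
      exact ih _ _ (by intro z; simp [h z])

lemma pvSet_update_eq (seen t : List String) :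
    PySem.Set.update seen t = seen ++ pvFirsts seen t := by
  induction t generalizing seen with
  | nil => simp [PySem.Set.update, pvFirsts]
  | cons y t ih =>
    have hstep : PySem.Set.update seen (y :: t) = PySem.Set.update (PySem.Set.add seen y) t := by
      simp [PySem.Set.update]
    by_cases hy : y ∈ seen
    · rw [hstep]
      have : PySem.Set.add seen y = seen := by
        simp [PySem.Set.add, PySem.Set.contains, hy]
      rw [this, ih, pvFirsts, if_pos hy]
    · rw [hstep]
      have : PySem.Set.add seen y = seen ++ [y] := by
        simp [PySem.Set.add, PySem.Set.contains, hy]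
      rw [this, ih, pvFirsts, if_neg hy]
      rw [pvFirsts_congr (seen ++ [y]) (y :: seen) t (by intro z; simp; tauto)]
      simp

lemma pvOfList_eq_firsts (s : List String) : PySem.Set.ofList s = pvFirsts [] s := by
  rw [← PySem.Set.update_nil_left, pvSet_update_eq]; rfl

lemma pvEnum_filter (c : String) (s : List String) (k : Int) :
    (List.map (fun p => p.1) (List.filter (fun p => p.2 == c) (PySem.List.enumerate s k)))
      = pvOccs c k s := by
  induction s generalizing k with
  | nil => simp [PySem.List.enumerate, pvOccs]
  | cons y t ih =>
    simp only [PySem.List.enumerate, pvOccs, List.filter_cons]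
    by_cases hy : y = c
    · simp [hy, ih]
    · simp [hy, ih, beq_iff_eq]

-- the two loop bodies of port A, named for the proofs
def pvIStep (s : List String) (i : Int) : (List Int × List Bool) → Int → (List Int × List Bool) :=
  fun st2 j =>
    if PySem.List.pyGetD s i "" == PySem.List.pyGetD s j "" then
      (st2.1 ++ [j], PySem.List.pySetD st2.2 j true)
    else st2

def pvOStep (s : List String) : (List (List Int) × List Bool) → Int → (List (List Int) × List Bool) :=
  fun st i =>
    if PySem.List.pyGetD st.2 i false then st
    else
      let inner := (PySem.List.pyRange (i + 1) (s.length : Int)).foldl (pvIStep s i) ([i], st.2)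
      (st.1 ++ [inner.1], inner.2)

lemma pvInner (s : List String) (i : Int) (fuel : Nat) :
    ∀ (m : Nat) (cg : List Int) (vis : List Bool), m + fuel = s.length → vis.length = s.length →
    ((PySem.List.pyRange (m : Int) (s.length : Int)).foldl (pvIStep s i) (cg, vis)).1
        = cg ++ pvOccs (PySem.List.pyGetD s i "") (m : Int) (s.drop m)
    ∧ ((PySem.List.pyRange (m : Int) (s.length : Int)).foldl (pvIStep s i) (cg, vis)).2.length
        = s.length
    ∧ ∀ jj : Nat,
      ((PySem.List.pyRange (m : Int) (s.length : Int)).foldl (pvIStep s i) (cg, vis)).2.getD jj false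
        = (vis.getD jj false
            || decide (m ≤ jj ∧ jj < s.length ∧ s.getD jj "" = PySem.List.pyGetD s i "")) := by
  induction fuel with
  | zero =>
    intro m cg vis hm hv
    rw [PySem.List.pyRange_one_eq_nil (by exact_mod_cast Nat.le_of_eq hm.symm)]
    have hdrop : s.drop m = [] := List.drop_eq_nil_of_le (by omega)
    refine ⟨by simp [hdrop, pvOccs], by simpa using hv, ?_⟩
    intro jj
    have : ¬ (m ≤ jj ∧ jj < s.length ∧ s.getD jj "" = PySem.List.pyGetD s i "") := by
      rintro ⟨h1, h2, -⟩; omega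
    rw [decide_eq_false this, Bool.or_false]
    rfl
  | succ fuel ih =>
    intro m cg vis hm hv
    have hmlt : m < s.length := by omega
    rw [PySem.List.pyRange_one_cons (by exact_mod_cast hmlt), List.foldl_cons]
    have hcast : (m : Int) + 1 = ((m + 1 : Nat) : Int) := by push_cast; ring
    have hsm : PySem.List.pyGetD s (m : Int) "" = s.getD m "" := by
      simp [PySem.List.pyGetD_natCast]
    have hdrop : s.drop m = s.getD m "" :: s.drop (m + 1) := by
      rw [List.drop_eq_getElem_cons hmlt, List.getD_eq_getElem s "" hmlt]
    by_cases heq : s.getD m "" = PySem.List.pyGetD s i ""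
    · have hguard : pvIStep s i (cg, vis) (m : Int)
          = (cg ++ [(m : Int)], vis.set m true) := by
        simp only [pvIStep, hsm, heq, beq_self_eq_true, if_true,
          PySem.List.pySetD_natCast]
      rw [hguard, hcast]
      obtain ⟨h1, h2, h3⟩ := ih (m + 1) (cg ++ [(m : Int)]) (vis.set m true)
        (by omega) (by simpa using hv)
      refine ⟨?_, h2, ?_⟩
      · rw [h1, hdrop, ← hcast]
        simp only [pvOccs]
        rw [if_pos heq]
        simp [List.append_assoc]
      · intro jj
        rw [h3 jj]
        by_cases hj : jj = m
        · subst hj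
          have hset : (vis.set jj true).getD jj false = true := by
            rw [List.getD_eq_getElem?_getD, List.getElem?_set_self (by omega)]
            simp
          have hr : decide (jj ≤ jj ∧ jj < s.length ∧ s.getD jj "" = PySem.List.pyGetD s i "")
              = true := by rw [decide_eq_true_eq]; exact ⟨le_rfl, hmlt, heq⟩
          rw [hset, hr]
          simp
        · have hset : (vis.set m true).getD jj false = vis.getD jj false := by
            rw [List.getD_eq_getElem?_getD, List.getElem?_set_ne (by omega),
              ← List.getD_eq_getElem?_getD]
          rw [hset]
          have : (m + 1 ≤ jj ∧ jj < s.length ∧ s.getD jj "" = PySem.List.pyGetD s i "")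
              ↔ (m ≤ jj ∧ jj < s.length ∧ s.getD jj "" = PySem.List.pyGetD s i "") := by
            constructor <;> rintro ⟨a, b, c⟩ <;> exact ⟨by omega, b, c⟩
          rw [decide_eq_decide.mpr this]
    · have hguard : pvIStep s i (cg, vis) (m : Int) = (cg, vis) := by
        simp [pvIStep, hsm]
        intro h; exact absurd h.symm heq
      rw [hguard, hcast]
      obtain ⟨h1, h2, h3⟩ := ih (m + 1) cg vis (by omega) hv
      refine ⟨?_, h2, ?_⟩
      · rw [h1, hdrop]
        simp only [pvOccs]
        rw [if_neg heq, ← hcast]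
      · intro jj
        rw [h3 jj]
        by_cases hj : jj = m
        · subst hj
          have hl : ¬ (jj + 1 ≤ jj ∧ jj < s.length ∧ s.getD jj "" = PySem.List.pyGetD s i "") := by
            rintro ⟨a, -, -⟩; omega
          have hr : ¬ (jj ≤ jj ∧ jj < s.length ∧ s.getD jj "" = PySem.List.pyGetD s i "") := by
            rintro ⟨-, -, c⟩; exact heq c
          rw [decide_eq_false hl, decide_eq_false hr]
        · have : (m + 1 ≤ jj ∧ jj < s.length ∧ s.getD jj "" = PySem.List.pyGetD s i "")
              ↔ (m ≤ jj ∧ jj < s.length ∧ s.getD jj "" = PySem.List.pyGetD s i "") := by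
            constructor <;> rintro ⟨a, b, c⟩ <;> exact ⟨by omega, b, c⟩
          rw [decide_eq_decide.mpr this]

lemma pvOccs_full (s : List String) (x : String) (m : Nat) (hm : m < s.length)
    (hx : s.getD m "" = x) (hmem : x ∉ s.take m) :
    pvOccs x 0 s = (m : Int) :: pvOccs x ((m + 1 : Nat) : Int) (s.drop (m + 1)) := by
  conv_lhs => rw [← List.take_append_drop m s]
  rw [pvOccs_append, pvOccs_nil_of_not_mem x 0 _ hmem]
  have hlen : ((s.take m).length : Int) = (m : Int) := by
    simp [List.length_take, Nat.min_eq_left (le_of_lt hm)]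
  have hdrop : s.drop m = s.getD m "" :: s.drop (m + 1) := by
    rw [List.drop_eq_getElem_cons hm, List.getD_eq_getElem s "" hm]
  have h0 : (0 : Int) + ((s.take m).length : Int) = (m : Int) := by rw [hlen]; ring
  rw [hdrop, hx, h0]
  simp only [pvOccs, if_true]
  rw [List.nil_append]
  congr 1

lemma pvOuter (s : List String) (fuel : Nat) :
    ∀ (m : Nat) (groups : List (List Int)) (vis : List Bool),
    m + fuel = s.length → vis.length = s.length →
    (∀ j : Nat, m ≤ j → j < s.length → vis.getD j false = decide (s.getD j "" ∈ s.take m)) →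
    ((PySem.List.pyRange (m : Int) (s.length : Int)).foldl (pvOStep s) (groups, vis)).1
      = groups ++ (pvFirsts (s.take m) (s.drop m)).map (fun c => pvOccs c 0 s) := by
  induction fuel with
  | zero =>
    intro m groups vis hm hv hinv
    rw [PySem.List.pyRange_one_eq_nil (by exact_mod_cast Nat.le_of_eq hm.symm)]
    have hdrop : s.drop m = [] := List.drop_eq_nil_of_le (by omega)
    simp [hdrop, pvFirsts]
  | succ fuel ih =>
    intro m groups vis hm hv hinv
    have hmlt : m < s.length := by omega
    rw [PySem.List.pyRange_one_cons (by exact_mod_cast hmlt), List.foldl_cons]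
    have hcast : (m : Int) + 1 = ((m + 1 : Nat) : Int) := by push_cast; ring
    have hvm : PySem.List.pyGetD vis (m : Int) false = decide (s.getD m "" ∈ s.take m) := by
      rw [PySem.List.pyGetD_natCast]
      exact hinv m le_rfl hmlt
    have hdrop : s.drop m = s.getD m "" :: s.drop (m + 1) := by
      rw [List.drop_eq_getElem_cons hmlt, List.getD_eq_getElem s "" hmlt]
    have htake : s.take (m + 1) = s.take m ++ [s.getD m ""] := by
      rw [List.take_succ, List.getElem?_eq_getElem hmlt, List.getD_eq_getElem s "" hmlt]
      rfl
    by_cases hmem : s.getD m "" ∈ s.take m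
    · have hiff : ∀ z, z ∈ s.take m ↔ z ∈ s.take (m + 1) := by
        intro z
        rw [htake]
        constructor
        · exact fun h => List.mem_append_left _ h
        · intro h
          rcases List.mem_append.mp h with h | h
          · exact h
          · rw [List.mem_singleton.mp h]; exact hmem
      have hvmt : PySem.List.pyGetD vis (m : Int) false = true := by
        rw [hvm, decide_eq_true hmem]
      have hguard : pvOStep s (groups, vis) (m : Int) = (groups, vis) := by
        simp [pvOStep, hvmt]
      rw [hguard, hcast]
      rw [ih (m + 1) groups vis (by omega) hv (by
        intro j hj1 hj2
        rw [hinv j (by omega) hj2]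
        exact decide_eq_decide.mpr (hiff _))]
      congr 2
      rw [hdrop]
      simp only [pvFirsts, if_pos hmem]
      exact pvFirsts_congr _ _ _ (fun z => (hiff z).symm)
    · have hvmf : PySem.List.pyGetD vis (m : Int) false = false := by
        rw [hvm, decide_eq_false hmem]
      obtain ⟨h1, h2, h3⟩ := pvInner s (m : Int) fuel (m + 1) [(m : Int)] vis (by omega) hv
      have hsm : PySem.List.pyGetD s (m : Int) "" = s.getD m "" := by
        simp [PySem.List.pyGetD_natCast]
      have hguard : pvOStep s (groups, vis) (m : Int)
          = (groups ++ [((PySem.List.pyRange ((m : Int) + 1) (s.length : Int)).foldl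
                (pvIStep s (m : Int)) ([(m : Int)], vis)).1],
             ((PySem.List.pyRange ((m : Int) + 1) (s.length : Int)).foldl
                (pvIStep s (m : Int)) ([(m : Int)], vis)).2) := by
        simp [pvOStep, hvmf]
      rw [hguard, hcast]
      rw [ih (m + 1) _ _ (by omega) h2 (by
        intro j hj1 hj2
        rw [h3 j, hinv j (by omega) hj2, htake, hsm]
        by_cases hee : s.getD j "" = s.getD m ""
        · have hL : decide (m + 1 ≤ j ∧ j < s.length ∧ s.getD j "" = s.getD m "") = true :=
            decide_eq_true ⟨hj1, hj2, hee⟩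
          have hR : s.getD j "" ∈ s.take m ++ [s.getD m ""] :=
            List.mem_append_right _ (by rw [hee]; exact List.mem_singleton_self _)
          rw [hL, decide_eq_true hR]
          simp
        · have hL : decide (m + 1 ≤ j ∧ j < s.length ∧ s.getD j "" = s.getD m "") = false :=
            decide_eq_false (by rintro ⟨-, -, c⟩; exact hee c)
          have hiff2 : (s.getD j "" ∈ s.take m ++ [s.getD m ""]) ↔ (s.getD j "" ∈ s.take m) := by
            constructor
            · intro h
              rcases List.mem_append.mp h with h | h
              · exact h
              · exact absurd (List.mem_singleton.mp h) hee
            · exact fun h => List.mem_append_left _ h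
          rw [hL, Bool.or_false, decide_eq_decide.mpr hiff2])]
      rw [h1, hsm]
      have hocc : pvOccs (s.getD m "") 0 s
          = (m : Int) :: pvOccs (s.getD m "") ((m + 1 : Nat) : Int) (s.drop (m + 1)) :=
        pvOccs_full s _ m hmlt rfl hmem
      rw [hdrop]
      simp only [pvFirsts, if_neg hmem, List.map_cons]
      rw [pvFirsts_congr (s.getD m "" :: s.take m) (s.take (m + 1)) _ (by
        intro z
        rw [htake]
        constructor
        · intro h
          rcases List.mem_cons.mp h with h | h
          · rw [h]; exact List.mem_append_right _ (List.mem_singleton_self _)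
          · exact List.mem_append_left _ h
        · intro h
          rcases List.mem_append.mp h with h | h
          · exact List.mem_cons_of_mem _ h
          · rw [List.mem_singleton.mp h]; simp)]
      rw [hocc]
      push_cast
      simp [List.append_assoc]

lemma pvA_eq (s : List String) :
    group_identical_strings_simple s = (pvFirsts [] s).map (fun c => pvOccs c 0 s) := by
  show ((PySem.List.pyRange ((0 : Nat) : Int) (s.length : Int)).foldl (pvOStep s)
      ([], List.replicate s.length false)).1 = _
  rw [pvOuter s s.length 0 [] (List.replicate s.length false) (by omega) (by simp) (by
    intro j _ hj
    rw [List.getD_eq_getElem?_getD, List.getElem?_replicate_of_lt hj]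
    simp)]
  simp

lemma pvB_eq (s : List String) :
    group_identical_strings_simple_alt s = (PySem.Set.ofList s).map (fun c => pvOccs c 0 s) := by
  show (PySem.Dict.values _) = _
  have hnd : ((PySem.List.enumerate s).foldl
      (fun (d : PySem.Dict String (List Int)) p => d.modify p.2 [] (fun v => v ++ [p.1]))
      PySem.Dict.empty).keys.Nodup := by
    exact PySem.Dict.nodup_keys_foldl_modify_key (PySem.List.enumerate s)
      (fun (p : Int × String) => p.2) [] (fun _ p v => v ++ [p.1]) PySem.Dict.empty
      (by simp [PySem.Dict.keys_empty])
  rw [PySem.Dict.values_eq_map_keys _ hnd []]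
  have hkeys : ((PySem.List.enumerate s).foldl
      (fun (d : PySem.Dict String (List Int)) p => d.modify p.2 [] (fun v => v ++ [p.1]))
      PySem.Dict.empty).keys = PySem.Set.ofList s := by
    rw [PySem.Dict.keys_foldl_modify_key (PySem.List.enumerate s)
      (fun (p : Int × String) => p.2) [] (fun _ p v => v ++ [p.1]) PySem.Dict.empty]
    simp [PySem.Dict.keys_empty, PySem.Set.update_nil_left, PySem.List.map_snd_enumerate]
  rw [hkeys]
  refine List.map_congr_left (fun c _ => ?_)
  have hswap : ((PySem.List.enumerate s).foldl
      (fun (d : PySem.Dict String (List Int)) p => d.modify p.2 [] (fun v => v ++ [p.1]))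
      PySem.Dict.empty)
      = (((PySem.List.enumerate s).map Prod.swap).foldl
      (fun (d : PySem.Dict String (List Int)) p => d.modify p.1 [] (fun v => v ++ [p.2]))
      PySem.Dict.empty) := by
    rw [List.foldl_map]
    rfl
  rw [hswap, PySem.Dict.getD_foldl_modify_append]
  simp only [PySem.Dict.getD_empty, List.nil_append]
  rw [← pvEnum_filter c s 0]
  rw [List.filter_map, List.map_map]
  rfl

-- ===== VERDICT (by name: the statement is the Claim_ definition above) =====
theorem group_identical_strings_simple_spec : Claim_equal_group_identical_strings_simple := by
  intro s _
  show _ = _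
  rw [pvA_eq, pvB_eq, pvOfList_eq_firsts]
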